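-- pv_equiv track=rewrite | github.com/knqiufan/Misaka | misaka/ui/chat/components/message_input.py | _find_active_at
-- ===== SOURCE A (Python) =====
-- def _find_active_at(text: str) -> int:
--     """Find the position of the last valid @ trigger in *text*.
--
--     A valid @ is either at position 0 or preceded by whitespace.
--     Returns -1 if none found.
--     """
--     pos = len(text)
--     while pos > 0:
--         pos = text.rfind("@", 0, pos)
--         if pos < 0:
--             return -1
--         if pos == 0 or text[pos - 1] in " \n\t":
--             return pos
--     return -1
-- ===== SOURCE B (Python) =====
-- def _find_active_at(text: str) -> int:
--     """Forward single pass: remember the last index i where text[i] == '@'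
--     that is a valid trigger (at the start or preceded by whitespace); -1 if none."""
--     best = -1
--     for i, c in enumerate(text):
--         if c == "@" and (i == 0 or text[i - 1] in " \n\t"):
--             best = i
--     return best
-- ===== Notes on version B (the rewrite author's own statement) =====
-- stated objective: idiomatic
-- what changed: Replaces the backward while-loop of repeated rfind jumps with a single forward enumerate pass that keeps the last valid trigger index in an accumulator.
import Mathlib
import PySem

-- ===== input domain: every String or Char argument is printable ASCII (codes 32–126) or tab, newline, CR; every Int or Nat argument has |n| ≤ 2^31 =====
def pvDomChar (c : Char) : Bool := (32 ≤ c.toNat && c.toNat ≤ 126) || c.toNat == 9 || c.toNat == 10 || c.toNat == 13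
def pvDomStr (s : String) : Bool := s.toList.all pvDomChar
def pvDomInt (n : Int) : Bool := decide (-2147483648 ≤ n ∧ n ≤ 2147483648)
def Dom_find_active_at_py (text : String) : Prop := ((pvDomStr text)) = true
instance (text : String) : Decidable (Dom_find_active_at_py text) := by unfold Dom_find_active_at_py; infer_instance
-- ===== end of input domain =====

-- B replaces A's backward rfind-jump loop with a single forward pass keeping the last valid trigger index (idiomatic; same cost).

-- ===== PORT A =====
-- text.rfind("@", 0, pos) with 0 ≤ pos ≤ len(text): hand port, exact for this call —
-- the highest index i < pos with text[i] == '@', else none (Python's -1, A's `pos < 0` branch).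
def rfindAt (l : List Char) (pos : Nat) : Option Nat :=
  match pos with
  | 0 => none
  | p + 1 => if l.getD p ' ' = '@' then some p else rfindAt l p

-- termination lemma for the port's loop (cited by name in decreasing_by)
theorem rfindAt_lt {l : List Char} {pos p : Nat} (h : rfindAt l pos = some p) : p < pos := by
  induction pos with
  | zero => simp [rfindAt] at h
  | succ q ih =>
    simp only [rfindAt] at h
    split at h
    · cases h; omega
    · exact Nat.lt_succ_of_lt (ih h)

-- the `while pos > 0` loop of A
def aLoop (l : List Char) (pos : Nat) : Int :=
  match h : rfindAt l pos with
  | none => -1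
  | some p =>
    if p = 0 ∨ l.getD (p - 1) ' ' ∈ ([' ', '\n', '\t'] : List Char) then (p : Int)
    else aLoop l p
termination_by pos
decreasing_by exact rfindAt_lt h

def find_active_at_py (text : String) : Int :=
  aLoop text.toList text.toList.length

-- ===== PORT B =====
def find_active_at_py_alt (text : String) : Int :=
  let l := text.toList
  (PySem.List.enumerate l).foldl
    (fun best ic =>
      if ic.2 = '@' ∧ (ic.1 = 0 ∨ l.getD (ic.1 - 1).toNat ' ' ∈ ([' ', '\n', '\t'] : List Char))
      then ic.1 else best) (-1)

-- ===== PRECONDITION & SPEC =====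
def Spec_find_active_at_py (text : String) (out : Int) : Prop := out = find_active_at_py_alt text
instance (text : String) (out : Int) : Decidable (Spec_find_active_at_py text out) := by unfold Spec_find_active_at_py; infer_instance

-- ===== CLAIM (what is proved, stated in full; the proofs are below) =====
def Claim_equal_find_active_at_py : Prop := ∀ (text : String), Dom_find_active_at_py text → Spec_find_active_at_py text (find_active_at_py text)

-- ===== LEMMAS AND PROOFS =====

-- common reference: fold the validity test over indices 0..pos-1
def stepF (l : List Char) (best : Int) (i : Nat) : Int :=
  if l.getD i ' ' = '@' ∧ (i = 0 ∨ l.getD (i - 1) ' ' ∈ ([' ', '\n', '\t'] : List Char))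
  then (i : Int) else best

def rangeFold (l : List Char) (pos : Nat) : Int :=
  (List.range pos).foldl (stepF l) (-1)

theorem rangeFold_succ (l : List Char) (q : Nat) :
    rangeFold l (q + 1) = stepF l (rangeFold l q) q := by
  simp [rangeFold, List.range_succ]

theorem rfindAt_some_at {l : List Char} {pos p : Nat} (h : rfindAt l pos = some p) :
    l.getD p ' ' = '@' := by
  induction pos with
  | zero => simp [rfindAt] at h
  | succ q ih =>
    simp only [rfindAt] at h
    split at h
    · cases h; assumption
    · exact ih h

theorem rfindAt_max {l : List Char} {pos p : Nat} (h : rfindAt l pos = some p) :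
    ∀ i, p < i → i < pos → l.getD i ' ' ≠ '@' := by
  induction pos with
  | zero => simp [rfindAt] at h
  | succ q ih =>
    simp only [rfindAt] at h
    split at h
    · cases h; intro i h1 h2; omega
    · intro i h1 h2
      rcases Nat.lt_succ_iff_lt_or_eq.mp h2 with h2 | h2
      · exact ih h i h1 h2
      · subst h2; assumption

theorem rfindAt_none {l : List Char} {pos : Nat} (h : rfindAt l pos = none) :
    ∀ i, i < pos → l.getD i ' ' ≠ '@' := by
  induction pos with
  | zero => intro i h1; omega
  | succ q ih =>
    simp only [rfindAt] at h
    split at h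
    · simp at h
    · intro i h1
      rcases Nat.lt_succ_iff_lt_or_eq.mp h1 with h1 | h1
      · exact ih h i h1
      · subst h1; assumption

-- indices carrying no '@' do not change the fold
theorem rangeFold_ext (l : List Char) (a : Nat) :
    ∀ b, a ≤ b → (∀ i, a ≤ i → i < b → l.getD i ' ' ≠ '@') →
      rangeFold l b = rangeFold l a := by
  intro b hab
  induction b, hab using Nat.le_induction with
  | base => intro _; rfl
  | succ q hq ih =>
    intro hno
    rw [rangeFold_succ]
    have : stepF l (rangeFold l q) q = rangeFold l q := by
      unfold stepF
      rw [if_neg]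
      intro hc
      exact hno q hq (by omega) hc.1
    rw [this]
    exact ih (fun i h1 h2 => hno i h1 (by omega))

theorem aLoop_eq (l : List Char) : ∀ pos, aLoop l pos = rangeFold l pos := by
  intro pos
  induction pos using Nat.strong_induction_on with
  | h pos ih =>
    rw [aLoop]
    cases h : rfindAt l pos with
    | none =>
      rw [rangeFold_ext l 0 pos (Nat.zero_le _) (fun i _ h2 => rfindAt_none h i h2)]
      rfl
    | some p =>
      have hp := rfindAt_lt h
      have hat := rfindAt_some_at h
      have hmax := rfindAt_max h
      have hup : rangeFold l pos = rangeFold l (p + 1) :=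
        rangeFold_ext l (p + 1) pos hp (fun i h1 h2 => hmax i (by omega) h2)
      change (if p = 0 ∨ l.getD (p - 1) ' ' ∈ ([' ', '\n', '\t'] : List Char) then (p : Int)
          else aLoop l p) = rangeFold l pos
      split_ifs with hv
      · rw [hup, rangeFold_succ]
        unfold stepF
        rw [if_pos ⟨hat, hv⟩]
      · rw [ih p hp, hup, rangeFold_succ]
        unfold stepF
        rw [if_neg]
        intro hc
        exact hv hc.2

-- B's enumerate fold equals the index fold
theorem enum_fold_eq (l : List Char) :
    ∀ (xs : List Char) (s : Nat) (acc : Int),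
      (∀ k, k < xs.length → xs.getD k ' ' = l.getD (s + k) ' ') →
      (PySem.List.enumerate xs (s : Int)).foldl
        (fun best ic =>
          if ic.2 = '@' ∧ (ic.1 = 0 ∨ l.getD (ic.1 - 1).toNat ' ' ∈ ([' ', '\n', '\t'] : List Char))
          then ic.1 else best) acc
      = (List.range' s xs.length).foldl (stepF l) acc := by
  intro xs
  induction xs with
  | nil => intro s acc _; simp [PySem.List.enumerate]
  | cons x xs ih =>
    intro s acc hx
    rw [PySem.List.enumerate_cons]
    have hx0 : x = l.getD s ' ' := by
      have := hx 0 (by simp); simpa using this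
    have harg :
        (if x = '@' ∧ ((s : Int) = 0 ∨ l.getD ((s : Int) - 1).toNat ' ' ∈ ([' ', '\n', '\t'] : List Char))
         then (s : Int) else acc) = stepF l acc s := by
      have h1 : ((s : Int) - 1).toNat = s - 1 := by omega
      simp only [stepF, hx0, Nat.cast_eq_zero, h1]
    have hcast : ((s : Int) + 1) = ((s + 1 : Nat) : Int) := by push_cast; ring
    simp only [List.foldl_cons, List.length_cons, List.range'_succ, hcast]
    rw [ih (s + 1) _ (fun k hk => by
      have := hx (k + 1) (by simpa using Nat.succ_lt_succ hk)
      simpa [Nat.add_assoc, Nat.add_comm 1 k] using this)]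
    rw [harg]

-- ===== VERDICT (by name: the statement is the Claim_ definition above) =====
theorem find_active_at_py_spec : Claim_equal_find_active_at_py := by
  intro text _
  unfold Spec_find_active_at_py
  rw [find_active_at_py, aLoop_eq]
  simp only [find_active_at_py_alt]
  have hb := enum_fold_eq text.toList text.toList 0 (-1) (fun k hk => by simp)
  simp only [Nat.cast_zero] at hb
  rw [hb]
  simp [rangeFold, List.range_eq_range']
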